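-- pv_equiv track=rewrite | github.com/nlp-uoregon/trankit | trankit/utils/tokenizer_utils.py | split_to_subsequences
-- ===== SOURCE A (Python) =====
-- def split_to_subsequences(wordpieces, wordpiece_labels, wordpiece_ends, end_piece_ids,
--                           max_input_length):
--     subsequences = []
--     subseq = [[], [], []]
--
--     for wp_wpid, wl, we in zip(wordpieces, wordpiece_labels, wordpiece_ends):
--         wp, wpid = wp_wpid
--         subseq[0].append((wp, wpid))
--         subseq[1].append(wl)
--         subseq[2].append(we)
--         if wpid in end_piece_ids and len(subseq[0]) >= max_input_length - 10:
--             subsequences.append((subseq[0], subseq[1], subseq[2], end_piece_ids))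
--
--             subseq = [[], [], []]
--
--     if len(subseq[0]) > 0:
--         subsequences.append((subseq[0], subseq[1], subseq[2], end_piece_ids))
--     return subsequences
-- ===== SOURCE B (Python) =====
-- def split_to_subsequences(wordpieces, wordpiece_labels, wordpiece_ends, end_piece_ids,
--                           max_input_length):
--     # Pass 1: find the cut positions (index after each group) with a running count.
--     n = min(len(wordpieces), len(wordpiece_labels), len(wordpiece_ends))
--     cuts = []
--     count = 0
--     for i, (_, wpid) in enumerate(wordpieces[:n]):
--         count += 1
--         if wpid in end_piece_ids and count >= max_input_length - 10:
--             cuts.append(i + 1)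
--             count = 0
--     if count > 0:
--         cuts.append(n)
--     # Pass 2: slice the three parallel lists at the cut positions.
--     result = []
--     start = 0
--     for c in cuts:
--         result.append((wordpieces[start:c], wordpiece_labels[start:c],
--                        wordpiece_ends[start:c], end_piece_ids))
--         start = c
--     return result
-- ===== Notes on version B (the rewrite author's own statement) =====
-- stated objective: alternative
-- what changed: Instead of accumulating copies of the three growing sublists in one stateful pass, B first computes only the cut indices with a running counter and then slices the three parallel input lists between consecutive cuts.
import Mathlib
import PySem

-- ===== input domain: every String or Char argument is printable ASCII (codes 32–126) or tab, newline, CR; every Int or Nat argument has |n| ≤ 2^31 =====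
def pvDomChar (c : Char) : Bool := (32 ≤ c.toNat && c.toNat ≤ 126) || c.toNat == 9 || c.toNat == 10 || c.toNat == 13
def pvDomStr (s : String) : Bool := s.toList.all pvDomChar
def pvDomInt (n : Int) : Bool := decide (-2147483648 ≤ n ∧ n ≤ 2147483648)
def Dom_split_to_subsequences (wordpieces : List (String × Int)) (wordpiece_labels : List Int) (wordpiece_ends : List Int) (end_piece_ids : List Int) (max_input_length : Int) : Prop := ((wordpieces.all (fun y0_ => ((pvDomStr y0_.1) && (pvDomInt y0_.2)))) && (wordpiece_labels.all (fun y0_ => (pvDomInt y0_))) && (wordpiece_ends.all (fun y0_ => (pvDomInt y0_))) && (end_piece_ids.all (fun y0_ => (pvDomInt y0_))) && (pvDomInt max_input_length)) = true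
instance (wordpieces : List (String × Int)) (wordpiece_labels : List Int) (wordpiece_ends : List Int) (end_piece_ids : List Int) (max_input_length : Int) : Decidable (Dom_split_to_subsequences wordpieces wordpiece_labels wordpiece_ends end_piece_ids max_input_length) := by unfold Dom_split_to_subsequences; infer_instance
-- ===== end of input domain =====

-- B replaces A's single stateful pass (which grows copies of the three sublists) by a
-- cut-index pass followed by a slicing pass over the original lists; same cost, alternative structure.

-- ===== PORT A =====
-- literal transliteration of A: one fold over zip(wordpieces, zip(labels, ends)) carrying
-- (subsequences, subseq0, subseq1, subseq2), then the trailing-remainder append.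
-- the loop body of A's for-loop
def pvStepA (end_piece_ids : List Int) (max_input_length : Int)
    (st : List ((List (String × Int)) × List Int × List Int × List Int) × List (String × Int) × List Int × List Int)
    (x : (String × Int) × Int × Int) :
    List ((List (String × Int)) × List Int × List Int × List Int) × List (String × Int) × List Int × List Int :=
  let s0 := st.2.1 ++ [(x.1.1, x.1.2)]
  let s1 := st.2.2.1 ++ [x.2.1]
  let s2 := st.2.2.2 ++ [x.2.2]
  if x.1.2 ∈ end_piece_ids ∧ (s0.length : Int) ≥ max_input_length - 10 then
    (st.1 ++ [(s0, s1, s2, end_piece_ids)], [], [], [])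
  else
    (st.1, s0, s1, s2)

def split_to_subsequences (wordpieces : List (String × Int)) (wordpiece_labels : List Int) (wordpiece_ends : List Int) (end_piece_ids : List Int) (max_input_length : Int) : List ((List (String × Int)) × List Int × List Int × List Int) :=
  let fin := (wordpieces.zip (wordpiece_labels.zip wordpiece_ends)).foldl
    (pvStepA end_piece_ids max_input_length) ([], [], [], [])
  if fin.2.1.length > 0 then
    fin.1 ++ [(fin.2.1, fin.2.2.1, fin.2.2.2, end_piece_ids)]
  else fin.1

-- ===== PORT B =====
-- literal transliteration of Source B: pass 1 collects cut indices over enumerate(wordpieces[:n])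
-- with a running count, pass 2 slices the three parallel lists between consecutive cuts.
-- the loop body of Source B's first (cut-collecting) loop
def pvStepCuts (end_piece_ids : List Int) (max_input_length : Int)
    (st : List Int × Int) (x : Int × String × Int) : List Int × Int :=
  let count := st.2 + 1
  if x.2.2 ∈ end_piece_ids ∧ count ≥ max_input_length - 10 then
    (st.1 ++ [x.1 + 1], 0)
  else (st.1, count)

-- the loop body of Source B's second (slicing) loop
def pvStepSlice (wordpieces : List (String × Int)) (wordpiece_labels : List Int)
    (wordpiece_ends : List Int) (end_piece_ids : List Int)
    (st : List ((List (String × Int)) × List Int × List Int × List Int) × Int) (c : Int) :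
    List ((List (String × Int)) × List Int × List Int × List Int) × Int :=
  (st.1 ++ [(PySem.List.slice wordpieces (some st.2) (some c),
             PySem.List.slice wordpiece_labels (some st.2) (some c),
             PySem.List.slice wordpiece_ends (some st.2) (some c),
             end_piece_ids)], c)

def split_to_subsequences_alt (wordpieces : List (String × Int)) (wordpiece_labels : List Int) (wordpiece_ends : List Int) (end_piece_ids : List Int) (max_input_length : Int) : List ((List (String × Int)) × List Int × List Int × List Int) :=
  let n : Nat := min wordpieces.length (min wordpiece_labels.length wordpiece_ends.length)
  let p := (PySem.List.enumerate (wordpieces.take n) 0).foldl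
    (pvStepCuts end_piece_ids max_input_length) ([], 0)
  let cuts := if p.2 > 0 then p.1 ++ [(n : Int)] else p.1
  (cuts.foldl (pvStepSlice wordpieces wordpiece_labels wordpiece_ends end_piece_ids) ([], 0)).1

-- ===== PRECONDITION & SPEC =====
def Spec_split_to_subsequences (wordpieces : List (String × Int)) (wordpiece_labels : List Int) (wordpiece_ends : List Int) (end_piece_ids : List Int) (max_input_length : Int) (out : List ((List (String × Int)) × List Int × List Int × List Int)) : Prop := out = split_to_subsequences_alt wordpieces wordpiece_labels wordpiece_ends end_piece_ids max_input_length
instance (wordpieces : List (String × Int)) (wordpiece_labels : List Int) (wordpiece_ends : List Int) (end_piece_ids : List Int) (max_input_length : Int) (out : List ((List (String × Int)) × List Int × List Int × List Int)) : Decidable (Spec_split_to_subsequences wordpieces wordpiece_labels wordpiece_ends end_piece_ids max_input_length out) := by unfold Spec_split_to_subsequences; infer_instance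

-- ===== CLAIM (what is proved, stated in full; the proofs are below) =====
def Claim_equal_split_to_subsequences : Prop := ∀ (wordpieces : List (String × Int)) (wordpiece_labels : List Int) (wordpiece_ends : List Int) (end_piece_ids : List Int) (max_input_length : Int), Dom_split_to_subsequences wordpieces wordpiece_labels wordpiece_ends end_piece_ids max_input_length → Spec_split_to_subsequences wordpieces wordpiece_labels wordpiece_ends end_piece_ids max_input_length (split_to_subsequences wordpieces wordpiece_labels wordpiece_ends end_piece_ids max_input_length)

-- ===== LEMMAS AND PROOFS =====

-- reference one-pass chunker over the zipped list, carrying the current triple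
def pvGold (epi : List Int) (mil : Int) :
    List ((String × Int) × Int × Int) →
    (List (String × Int) × List Int × List Int) →
    List ((List (String × Int)) × List Int × List Int × List Int)
  | [], t => if t.1.length > 0 then [(t.1, t.2.1, t.2.2, epi)] else []
  | x :: xs, t =>
    let s0 := t.1 ++ [(x.1.1, x.1.2)]
    let s1 := t.2.1 ++ [x.2.1]
    let s2 := t.2.2 ++ [x.2.2]
    if x.1.2 ∈ epi ∧ (s0.length : Int) ≥ mil - 10 then
      (s0, s1, s2, epi) :: pvGold epi mil xs ([], [], [])
    else pvGold epi mil xs (s0, s1, s2)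

-- cut indices, recursively (Nat positions, Int running count)
def pvCuts (epi : List Int) (mil : Int) :
    Nat → Int → List ((String × Int) × Int × Int) → List Nat × Int
  | _, cnt, [] => ([], cnt)
  | i, cnt, x :: xs =>
    if x.1.2 ∈ epi ∧ cnt + 1 ≥ mil - 10 then
      let r := pvCuts epi mil (i + 1) 0 xs
      ((i + 1) :: r.1, r.2)
    else pvCuts epi mil (i + 1) (cnt + 1) xs

def pvTriple (l : List ((String × Int) × Int × Int)) :
    List (String × Int) × List Int × List Int :=
  (l.map (·.1), l.map (·.2.1), l.map (·.2.2))

-- slices of the zipped list between consecutive cuts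
def pvSlices (epi : List Int) (full : List ((String × Int) × Int × Int)) :
    Nat → List Nat → List ((List (String × Int)) × List Int × List Int × List Int)
  | _, [] => []
  | s, c :: cs =>
    ((pvTriple ((full.take c).drop s)).1, (pvTriple ((full.take c).drop s)).2.1,
     (pvTriple ((full.take c).drop s)).2.2, epi) :: pvSlices epi full c cs

def pvWithFinal (n : Nat) (p : List Nat × Int) : List Nat :=
  if p.2 > 0 then p.1 ++ [n] else p.1

-- A's fold equals pvGold
theorem pvA_fold (epi : List Int) (mil : Int) :
    ∀ (zs : List ((String × Int) × Int × Int))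
      (subs : List ((List (String × Int)) × List Int × List Int × List Int))
      (t : List (String × Int) × List Int × List Int),
    (let fin := zs.foldl (pvStepA epi mil) (subs, t)
     if fin.2.1.length > 0 then fin.1 ++ [(fin.2.1, fin.2.2.1, fin.2.2.2, epi)] else fin.1)
    = subs ++ pvGold epi mil zs t := by
  intro zs
  induction zs with
  | nil =>
    intro subs t
    simp only [List.foldl_nil, pvGold]
    split <;> simp
  | cons x xs ih =>
    intro subs t
    simp only [List.foldl_cons, pvGold, pvStepA]
    split
    · rw [ih]; simp
    · rw [ih]

-- B's first fold equals pvCuts (indices become Int casts)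
theorem pvB_cuts (epi : List Int) (mil : Int) :
    ∀ (zs : List ((String × Int) × Int × Int)) (i : Nat) (acc : List Int) (cnt : Int),
    (PySem.List.enumerate (zs.map (·.1)) (i : Int)).foldl (pvStepCuts epi mil) (acc, cnt)
    = (acc ++ (pvCuts epi mil i cnt zs).1.map (Nat.cast), (pvCuts epi mil i cnt zs).2) := by
  intro zs
  induction zs with
  | nil => intro i acc cnt; simp [pvCuts, PySem.List.enumerate_nil]
  | cons x xs ih =>
    intro i acc cnt
    rw [List.map_cons, PySem.List.enumerate_cons, List.foldl_cons]
    simp only [pvCuts, pvStepCuts]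
    have hcast : ((i : Int) + 1) = ((i + 1 : Nat) : Int) := by push_cast; ring
    split
    · rw [hcast, ih (i + 1)]
      simp
    · rw [hcast, ih (i + 1)]

-- the cut positions produced by pvCuts are bounded by i + |zs|
theorem pvCuts_le (epi : List Int) (mil : Int) :
    ∀ (zs : List ((String × Int) × Int × Int)) (i : Nat) (cnt : Int),
    ∀ c ∈ (pvCuts epi mil i cnt zs).1, c ≤ i + zs.length := by
  intro zs
  induction zs with
  | nil => intro i cnt c hc; simp [pvCuts] at hc
  | cons x xs ih =>
    intro i cnt c hc
    simp only [pvCuts] at hc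
    split at hc
    · rcases List.mem_cons.mp hc with h | h
      · simp only [h, List.length_cons]; omega
      · have := ih (i + 1) 0 c h; simp at *; omega
    · have := ih (i + 1) (cnt + 1) c hc; simp at *; omega

-- main invariant: slicing the zipped list at the cuts computed from position |left|
-- reproduces pvGold on the remainder with the pending triple left.drop s
theorem pvMain (epi : List Int) (mil : Int) :
    ∀ (rest left : List ((String × Int) × Int × Int)) (s : Nat), s ≤ left.length →
    pvSlices epi (left ++ rest) s
      (pvWithFinal (left.length + rest.length)
        (pvCuts epi mil left.length ((left.length - s : Nat) : Int) rest))
    = pvGold epi mil rest (pvTriple (left.drop s)) := by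
  intro rest
  induction rest with
  | nil =>
    intro left s hs
    simp only [pvCuts, pvWithFinal, pvGold, pvTriple, List.length_nil, Nat.add_zero,
      List.append_nil]
    by_cases h : s < left.length
    · have hpos : (0 : Int) < ((left.length - s : Nat) : Int) := by
        have : 0 < left.length - s := by omega
        exact_mod_cast this
      rw [if_pos hpos, if_pos (by simp only [List.length_map, List.length_drop]; omega)]
      simp [pvSlices, pvTriple]
    · have hse : s = left.length := by omega
      subst hse
      have hz : ((left.length - left.length : Nat) : Int) = 0 := by simp
      rw [hz, if_neg (by omega), if_neg (by simp)]
      simp [pvSlices]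
  | cons x xs ih =>
    intro left s hs
    simp only [pvCuts, pvGold]
    by_cases hcond : x.1.2 ∈ epi ∧ ((left.length - s : Nat) : Int) + 1 ≥ mil - 10
    · rw [if_pos hcond]
      rw [if_pos (show x.1.2 ∈ epi ∧
          ((((pvTriple (left.drop s)).1 ++ [(x.1.1, x.1.2)]).length : Int) ≥ mil - 10) from
        ⟨hcond.1, by
          simp [pvTriple]
          have h2 := hcond.2
          omega⟩)]
      have hcomm : ∀ (n c : Nat) (r : List Nat × Int),
          pvWithFinal n (c :: r.1, r.2) = c :: pvWithFinal n r := by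
        intro n c r; unfold pvWithFinal; split <;> simp
      rw [hcomm]
      simp only [pvSlices]
      have htake : ((left ++ x :: xs).take (left.length + 1)).drop s = left.drop s ++ [x] := by
        rw [show left ++ x :: xs = (left ++ [x]) ++ xs from by simp,
            show left.length + 1 = (left ++ [x]).length from by simp,
            List.take_left, List.drop_append_of_le_length hs]
      rw [List.cons_eq_cons]
      refine ⟨?_, ?_⟩
      · rw [htake]
        simp [pvTriple]
      · have hih := ih (left ++ [x]) ((left ++ [x]).length) (le_refl _)
        rw [List.drop_length] at hih
        simp only [List.length_append, List.length_cons, List.length_nil, Nat.sub_self,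
          Nat.cast_zero] at hih ⊢
        rw [show left ++ [x] ++ xs = left ++ x :: xs from by simp] at hih
        rw [show left.length + 1 + xs.length = left.length + (xs.length + 1) from by omega] at hih
        rw [hih]
        simp [pvTriple]
    · rw [if_neg hcond]
      rw [if_neg (show ¬ (x.1.2 ∈ epi ∧
          ((((pvTriple (left.drop s)).1 ++ [(x.1.1, x.1.2)]).length : Int) ≥ mil - 10)) from by
        intro hx
        apply hcond
        refine ⟨hx.1, ?_⟩
        have h2 := hx.2
        simp [pvTriple] at h2
        omega)]
      have hih := ih (left ++ [x]) s (by simp only [List.length_append, List.length_cons, List.length_nil]; omega)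
      simp only [List.length_append, List.length_cons, List.length_nil] at hih ⊢
      rw [show left ++ [x] ++ xs = left ++ x :: xs from by simp] at hih
      rw [List.drop_append_of_le_length hs] at hih
      rw [show ((left.length + 1 - s : Nat) : Int) = ((left.length - s : Nat) : Int) + 1 from by
        push_cast [Nat.cast_sub hs, Nat.cast_sub (show s ≤ left.length + 1 from by omega)]
        ring] at hih
      rw [show left.length + 1 + xs.length = left.length + (xs.length + 1) from by omega] at hih
      rw [hih]
      congr 1
      simp [pvTriple]

-- unzip-style facts: prefixes of the three lists are projections of the zipped list
theorem pvZipProj :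
    ∀ (wp : List (String × Int)) (wl we : List Int),
      wp.take (wp.zip (wl.zip we)).length = (wp.zip (wl.zip we)).map (·.1) ∧
      wl.take (wp.zip (wl.zip we)).length = (wp.zip (wl.zip we)).map (·.2.1) ∧
      we.take (wp.zip (wl.zip we)).length = (wp.zip (wl.zip we)).map (·.2.2) := by
  intro wp
  induction wp with
  | nil => intro wl we; simp
  | cons a wp ih =>
    intro wl we
    cases wl with
    | nil => simp
    | cons b wl =>
      cases we with
      | nil => simp
      | cons c we =>
        have h := ih wl we
        simp only [List.zip_cons_cons, List.length_cons, List.take_succ_cons, List.map_cons]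
        exact ⟨by rw [h.1], by rw [h.2.1], by rw [h.2.2]⟩

-- B's second fold equals pvSlices (converting slices of the three lists into
-- projections of slices of the zipped list, using that every cut is ≤ |zs|)
theorem pvB_slices (epi : List Int) (wp : List (String × Int)) (wl we : List Int) :
    ∀ (cuts : List Nat) (acc : List ((List (String × Int)) × List Int × List Int × List Int)) (s : Nat),
    (∀ c ∈ cuts, c ≤ (wp.zip (wl.zip we)).length) →
    ((cuts.map (Nat.cast)).foldl (pvStepSlice wp wl we epi) (acc, (s : Int))).1
    = acc ++ pvSlices epi (wp.zip (wl.zip we)) s cuts := by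
  intro cuts
  induction cuts with
  | nil => intro acc s _; simp [pvSlices]
  | cons c cs ih =>
    intro acc s hb
    rw [List.map_cons, List.foldl_cons]
    have hcn : c ≤ (wp.zip (wl.zip we)).length := hb c (by simp)
    have hslice : ∀ (α : Type) (l : List α) (pr : (String × Int) × Int × Int → α),
        l.take (wp.zip (wl.zip we)).length = (wp.zip (wl.zip we)).map pr →
        PySem.List.slice l (some (s : Int)) (some (c : Int))
          = (((wp.zip (wl.zip we)).take c).drop s).map pr := by
      intro α l pr hproj
      have htc : l.take c = ((wp.zip (wl.zip we)).take c).map pr := by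
        rw [List.map_take, ← hproj, List.take_take, Nat.min_eq_left hcn]
      rw [PySem.List.slice_natCast, ← List.drop_take, htc, List.map_drop]
    have hproj := pvZipProj wp wl we
    rw [show (pvStepSlice wp wl we epi (acc, (s : Int)) (c : Int)) =
        (acc ++ [((pvTriple (((wp.zip (wl.zip we)).take c).drop s)).1,
                  (pvTriple (((wp.zip (wl.zip we)).take c).drop s)).2.1,
                  (pvTriple (((wp.zip (wl.zip we)).take c).drop s)).2.2, epi)], (c : Int)) from by
      unfold pvStepSlice
      rw [hslice _ wp _ hproj.1, hslice _ wl _ hproj.2.1, hslice _ we _ hproj.2.2]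
      simp [pvTriple]]
    rw [ih _ c (fun d hd => hb d (by simp [hd]))]
    simp [pvSlices]

-- ===== VERDICT (by name: the statement is the Claim_ definition above) =====
theorem split_to_subsequences_spec : Claim_equal_split_to_subsequences := by
  intro wp wl we epi mil _
  unfold Spec_split_to_subsequences split_to_subsequences split_to_subsequences_alt
  have hproj := pvZipProj wp wl we
  have hn : min wp.length (min wl.length we.length) = (wp.zip (wl.zip we)).length := by
    simp [List.length_zip]
  rw [pvA_fold epi mil (wp.zip (wl.zip we)) [] ([], [], [])]
  simp only [hn, hproj.1]
  have hcuts := pvB_cuts epi mil (wp.zip (wl.zip we)) 0 [] 0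
  simp only [Nat.cast_zero, List.nil_append] at hcuts
  rw [hcuts]
  have hbound := pvCuts_le epi mil (wp.zip (wl.zip we)) 0 0
  have hfin : (if (pvCuts epi mil 0 0 (wp.zip (wl.zip we))).2 > 0 then
        (pvCuts epi mil 0 0 (wp.zip (wl.zip we))).1.map (Nat.cast (R := Int)) ++ [((wp.zip (wl.zip we)).length : Int)]
      else (pvCuts epi mil 0 0 (wp.zip (wl.zip we))).1.map (Nat.cast (R := Int)))
      = ((pvWithFinal (wp.zip (wl.zip we)).length (pvCuts epi mil 0 0 (wp.zip (wl.zip we)))).map (Nat.cast (R := Int))) := by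
    unfold pvWithFinal
    split <;> simp
  rw [hfin]
  have hb : ∀ c ∈ pvWithFinal (wp.zip (wl.zip we)).length (pvCuts epi mil 0 0 (wp.zip (wl.zip we))),
      c ≤ (wp.zip (wl.zip we)).length := by
    intro c hc
    unfold pvWithFinal at hc
    split at hc
    · rcases List.mem_append.mp hc with h | h
      · have := hbound c h; omega
      · simp at h; omega
    · have := hbound c hc; omega
  have hsl := pvB_slices epi wp wl we
    (pvWithFinal (wp.zip (wl.zip we)).length (pvCuts epi mil 0 0 (wp.zip (wl.zip we)))) [] 0 hb
  simp only [Nat.cast_zero, List.nil_append] at hsl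
  rw [hsl]
  have hmain := pvMain (epi := epi) (mil := mil) (wp.zip (wl.zip we)) [] 0 (by simp)
  simp only [List.length_nil, List.nil_append, List.drop_nil, Nat.zero_add, Nat.sub_zero,
    Nat.cast_zero] at hmain
  rw [hmain]
  simp [pvTriple]
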